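-- pv_equiv track=rewrite | github.com/tmdgh1592/PROBLEM_SOLVE | BAEKJOON/HOMEWORK/09_06/PRO-GET_REPORT.py | solution
-- ===== SOURCE A (Python) =====
-- def solution(id_list, report, k):
--     answer = {id:0 for id in id_list}
--     reported = {id:set() for id in id_list}
--
--
--     for r in report:
--         user, reported_user= r.split()
--         reported[reported_user].add(user)
--
--     for reported_user, users in reported.items():
--         if len(users) >= k:
--             for user in users:
--                 answer[user] += 1
--
--     return list(answer.values())
-- ===== SOURCE B (Python) =====
-- def solution(id_list, report, k):
--     counts = {id: 0 for id in id_list}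
--     seen = set()
--     pairs = []
--     for r in report:
--         user, reported_user = r.split()
--         if (user, reported_user) not in seen:
--             seen.add((user, reported_user))
--             counts[reported_user] += 1
--             pairs.append((user, reported_user))
--     banned = {id for id, c in counts.items() if c >= k}
--     answer = {id: 0 for id in id_list}
--     for user, reported_user in pairs:
--         if reported_user in banned:
--             answer[user] += 1
--     return list(answer.values())
-- ===== Notes on version B (the rewrite author's own statement) =====
-- stated objective: idiomatic
-- what changed: Replaces A's per-id dict of reporter sets and nested credit loop by a single parse pass that dedups (user, target) pairs with one global set while counting reports per target, then a banned set and one flat credit pass over the distinct pairs.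
-- outside the precondition, e.g. on solution(['a'], ['x a'], 2): A returns [0], B returns [0]
import Mathlib
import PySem

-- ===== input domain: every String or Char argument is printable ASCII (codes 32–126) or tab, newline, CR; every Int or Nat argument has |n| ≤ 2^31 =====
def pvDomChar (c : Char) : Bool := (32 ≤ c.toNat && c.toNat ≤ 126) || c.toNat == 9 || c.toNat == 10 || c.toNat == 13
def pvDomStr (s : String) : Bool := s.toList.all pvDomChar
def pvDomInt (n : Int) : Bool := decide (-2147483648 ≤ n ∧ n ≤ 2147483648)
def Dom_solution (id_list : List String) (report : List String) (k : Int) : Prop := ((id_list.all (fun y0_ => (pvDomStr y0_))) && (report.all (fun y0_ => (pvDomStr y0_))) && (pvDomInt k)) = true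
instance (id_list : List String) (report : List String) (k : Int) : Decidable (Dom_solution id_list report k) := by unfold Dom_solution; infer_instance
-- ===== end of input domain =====

-- B: same counting task in one flat pass — a global set of distinct (user, target) pairs feeding a counts
-- table, a banned set, and a flat credit pass — instead of A's per-id dict of reporter sets with a nested loop.


-- ===== PORT A =====
def solution (id_list : List String) (report : List String) (k : Int) : List Int :=
  let answer0 : PySem.Dict String Int := id_list.foldl (fun d id => d.insert id 0) PySem.Dict.empty
  let reported0 : PySem.Dict String (PySem.Set String) :=
    id_list.foldl (fun d id => d.insert id PySem.Set.empty) PySem.Dict.empty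
  let reported := report.foldl (fun d r =>
      match PySem.Str.split₀ r with
      | [user, reported_user] =>
          match d.get? reported_user with
          | some s => d.insert reported_user (PySem.Set.add s user)
          | none => d            -- Python raises KeyError here; excluded by Pre_
      | _ => d) reported0        -- Python raises ValueError here; excluded by Pre_
  let answer := reported.items.foldl (fun a p =>
      if k ≤ (PySem.Set.len p.2 : Int) then
        p.2.foldl (fun a user => a.modify user 0 (· + 1)) a   -- answer[user] += 1 (KeyError excluded by Pre_)
      else a) answer0
  answer.values

-- ===== PORT B =====
def solution_alt (id_list : List String) (report : List String) (k : Int) : List Int :=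
  let counts0 : PySem.Dict String Int := id_list.foldl (fun d id => d.insert id 0) PySem.Dict.empty
  let st := report.foldl
      (fun (st : PySem.Dict String Int × PySem.Set (String × String) × List (String × String)) r =>
        -- 'user, reported_user = r.split()': exactly two words, else ValueError (excluded by Pre_)
        match (PySem.Str.split₀ r)[0]?, (PySem.Str.split₀ r)[1]?, (PySem.Str.split₀ r)[2]? with
        | some user, some reported_user, none =>
            if (user, reported_user) ∈ st.2.1 then st
            else (st.1.modify reported_user 0 (· + 1),   -- counts[reported_user] += 1 (KeyError excluded by Pre_)
                  PySem.Set.add st.2.1 (user, reported_user),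
                  st.2.2 ++ [(user, reported_user)])
        | _, _, _ => st)
      (counts0, PySem.Set.empty, [])
  let banned : PySem.Set String :=
    PySem.Set.ofList ((st.1.items.filter (fun p => k ≤ p.2)).map (·.1))
  let answer := st.2.2.foldl (fun a p =>
      if p.2 ∈ banned then a.modify p.1 0 (· + 1) else a)
    (id_list.foldl (fun d id => d.insert id 0) PySem.Dict.empty)
  answer.values

-- ===== PRECONDITION & SPEC =====
-- Pre_ excludes the inputs on which A raises (a report line not splitting into exactly two words → ValueError;
-- an unregistered reported id → KeyError; an unregistered reporter whose target gets banned → KeyError); for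
-- uniformity it requires BOTH words of every report line to be registered ids, which also excludes a few inputs
-- where A still returns (an unregistered reporter whose target is not banned) — see the cite in the claim.
def Pre_solution (id_list : List String) (report : List String) (k : Int) : Prop :=
  ∀ r ∈ report, (PySem.Str.split₀ r).length = 2 ∧ ∀ t ∈ PySem.Str.split₀ r, t ∈ id_list
instance (id_list : List String) (report : List String) (k : Int) : Decidable (Pre_solution id_list report k) := by unfold Pre_solution; infer_instance

def pvWitness_solution : List String × List String × Int :=
  (["muzi", "frodo", "apeach"], ["muzi frodo", "apeach frodo", "muzi frodo"], 2)

def Spec_solution (id_list : List String) (report : List String) (k : Int) (out : List Int) : Prop := out = solution_alt id_list report k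
instance (id_list : List String) (report : List String) (k : Int) (out : List Int) : Decidable (Spec_solution id_list report k out) := by unfold Spec_solution; infer_instance

-- ===== CLAIM (what is proved, stated in full; the proofs are below) =====
def Claim_equal_solution : Prop := ∀ (id_list : List String) (report : List String) (k : Int), Dom_solution id_list report k → Pre_solution id_list report k → Spec_solution id_list report k (solution id_list report k)


-- ===== LEMMAS AND PROOFS =====

-- the (user, reported_user) pair of a report line (used only by the proofs)
def pvParse (r : String) : String × String :=
  match PySem.Str.split₀ r with
  | [u, v] => (u, v)
  | _ => ("", "")

-- A's first loop, expressed on parsed pairs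
def pvStepA (d : PySem.Dict String (PySem.Set String)) (p : String × String) :
    PySem.Dict String (PySem.Set String) :=
  match d.get? p.2 with
  | some s => d.insert p.2 (PySem.Set.add s p.1)
  | none => d

-- B's first loop, expressed on parsed pairs
def pvStepB
    (st : PySem.Dict String Int × PySem.Set (String × String) × List (String × String))
    (p : String × String) :
    PySem.Dict String Int × PySem.Set (String × String) × List (String × String) :=
  if p ∈ st.2.1 then st
  else (st.1.modify p.2 0 (· + 1), PySem.Set.add st.2.1 p, st.2.2 ++ [p])

lemma pvSplit_eq {id_list : List String} {report : List String} {k : Int}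
    (hpre : Pre_solution id_list report k) {r : String} (hr : r ∈ report) :
    PySem.Str.split₀ r = [(pvParse r).1, (pvParse r).2] ∧
      (pvParse r).1 ∈ id_list ∧ (pvParse r).2 ∈ id_list := by
  obtain ⟨hlen, hall⟩ := hpre r hr
  match hs : PySem.Str.split₀ r with
  | [u, v] =>
    have hp : pvParse r = (u, v) := by simp [pvParse, hs]
    refine ⟨by simp [hp], ?_, ?_⟩
    · rw [hp]; exact hall u (by simp [hs])
    · rw [hp]; exact hall v (by simp [hs])
  | [] => simp [hs] at hlen
  | [u] => simp [hs] at hlen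
  | u :: v :: w :: t => simp [hs] at hlen

lemma pvInitDict_get? {ν : Type} (l : List String) (c : ν) (d : PySem.Dict String ν)
    (v : String) :
    (l.foldl (fun d i => d.insert i c) d).get? v = if v ∈ l then some c else d.get? v := by
  induction l generalizing d with
  | nil => simp
  | cons i t ih =>
    simp only [List.foldl_cons, ih]
    by_cases hv : v ∈ t
    · simp [hv]
    · by_cases hvi : v = i
      · simp [hvi, PySem.Dict.get?_insert_self]
      · simp [hv, hvi, PySem.Dict.get?_insert_of_ne d c hvi]

lemma pvInitDict_keys {ν : Type} (l : List String) (c : ν) :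
    (l.foldl (fun d i => d.insert i c) PySem.Dict.empty).keys = PySem.Set.ofList l := by
  have h := PySem.Dict.keys_foldl_insert l (fun _ _ => c) PySem.Dict.empty
  simpa [PySem.Set.update_nil_left] using h

lemma pvUpdate_of_subset {α : Type} [BEq α] [LawfulBEq α] (s : PySem.Set α) (xs : List α)
    (h : ∀ x ∈ xs, x ∈ s) : s.update xs = s := by
  rw [PySem.Set.update_eq_append_filter]
  have hnil : (PySem.Set.ofList xs).filter (fun y => !s.contains y) = [] := by
    apply List.filter_eq_nil_iff.mpr
    intro y hy
    have hyx : y ∈ xs := (PySem.Set.mem_ofList xs y).mp hy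
    have hcon : s.contains y = true := (PySem.Set.contains_iff s y).mpr (h y hyx)
    simp only [hcon, Bool.not_true, Bool.false_eq_true, not_false_eq_true]
  rw [hnil, List.append_nil]

lemma pvStepA_foldl (ps : List (String × String)) (d : PySem.Dict String (PySem.Set String))
    (hc : ∀ p ∈ ps, d.contains p.2 = true) :
    (ps.foldl pvStepA d).keys = d.keys ∧
      ∀ v, (ps.foldl pvStepA d).get? v =
        (d.get? v).map (fun s => s.update ((ps.filter (fun p => p.2 == v)).map (·.1))) := by
  induction ps generalizing d with
  | nil => simp [PySem.Set.update_nil]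
  | cons q t ih =>
    have hcq : d.contains q.2 = true := hc q (by simp)
    obtain ⟨s, hs⟩ : ∃ s, d.get? q.2 = some s := by
      rcases h : d.get? q.2 with _ | s
      · rw [PySem.Dict.contains_eq_isSome_get?, h] at hcq; simp at hcq
      · exact ⟨s, rfl⟩
    have hstep : pvStepA d q = d.insert q.2 (PySem.Set.add s q.1) := by
      simp [pvStepA, hs]
    have hc' : ∀ p ∈ t, (d.insert q.2 (PySem.Set.add s q.1)).contains p.2 = true := by
      intro p hp
      have := hc p (by simp [hp])
      simp [PySem.Dict.contains_insert, this]
    obtain ⟨ihk, ihg⟩ := ih (d.insert q.2 (PySem.Set.add s q.1)) hc'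
    refine ⟨?_, ?_⟩
    · rw [List.foldl_cons, hstep, ihk, PySem.Dict.keys_insert_of_contains d _ hcq]
    · intro v
      rw [List.foldl_cons, hstep, ihg v]
      by_cases hv : v = q.2
      · subst hv
        rw [PySem.Dict.get?_insert_self, hs]
        simp [PySem.Set.update_cons]
      · rw [PySem.Dict.get?_insert_of_ne d _ hv]
        have : (q.2 == v) = false := by
          simp only [beq_eq_false_iff_ne]; exact fun h => hv h.symm
        simp [this]

lemma pvStepB_foldl (id_list : List String) (ps : List (String × String))
    (hin : ∀ p ∈ ps, p.2 ∈ id_list) :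
    (ps.foldl pvStepB
        (id_list.foldl (fun d i => d.insert i (0 : Int)) PySem.Dict.empty,
          PySem.Set.empty, [])) =
      ((ps.foldl pvStepB
          (id_list.foldl (fun d i => d.insert i (0 : Int)) PySem.Dict.empty,
            PySem.Set.empty, [])).1,
        PySem.Set.ofList ps, PySem.Set.ofList ps) ∧
    (ps.foldl pvStepB
        (id_list.foldl (fun d i => d.insert i (0 : Int)) PySem.Dict.empty,
          PySem.Set.empty, [])).1.keys = PySem.Set.ofList id_list ∧
    ∀ v, (ps.foldl pvStepB
        (id_list.foldl (fun d i => d.insert i (0 : Int)) PySem.Dict.empty,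
          PySem.Set.empty, [])).1.getD v 0 =
      ((((PySem.Set.ofList ps).filter (fun p => p.2 == v)).length : Int)) := by
  induction ps using List.reverseRecOn with
  | nil =>
    refine ⟨rfl, ?_, ?_⟩
    · exact pvInitDict_keys id_list 0
    · intro v
      rw [List.foldl_nil, PySem.Dict.getD_eq_get?_getD, pvInitDict_get?]
      by_cases hv : v ∈ id_list
      · simp [hv]
      · simp [hv]
  | append_singleton t q ih =>
    obtain ⟨ih1, ih2, ih3⟩ := ih (fun p hp => hin p (by simp [hp]))
    have hq2 : q.2 ∈ id_list := hin q (by simp)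
    rw [List.foldl_append, List.foldl_cons, List.foldl_nil] at *
    rw [ih1]
    set C := (t.foldl pvStepB
        (id_list.foldl (fun d i => d.insert i (0 : Int)) PySem.Dict.empty,
          PySem.Set.empty, [])).1 with hC
    by_cases hq : q ∈ PySem.Set.ofList t
    · have hstep : pvStepB (C, PySem.Set.ofList t, PySem.Set.ofList t) q =
          (C, PySem.Set.ofList t, PySem.Set.ofList t) := by
        simp [pvStepB, hq]
      rw [hstep, PySem.Set.ofList_append_singleton, PySem.Set.add_of_mem hq]
      exact ⟨rfl, ih2, ih3⟩
    · have hstep : pvStepB (C, PySem.Set.ofList t, PySem.Set.ofList t) q =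
          (C.modify q.2 0 (· + 1), PySem.Set.add (PySem.Set.ofList t) q,
            PySem.Set.ofList t ++ [q]) := by
        simp [pvStepB, hq]
      rw [hstep, PySem.Set.ofList_append_singleton]
      have hadd := PySem.Set.add_of_not_mem hq
      refine ⟨by simp [hadd], ?_, ?_⟩
      · rw [PySem.Dict.keys_modify, PySem.Dict.keys_insert_of_contains C _ ?_]
        · exact ih2
        · rw [PySem.Dict.contains_iff_mem_keys, ih2]
          exact (PySem.Set.mem_ofList id_list q.2).mpr hq2
      · intro v
        rw [PySem.Dict.getD_modify, hadd, List.filter_append]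
        by_cases hv : v = q.2
        · have hb : (q.2 == v) = true := by simp [hv]
          simp [hv, ih3]
        · have hb : (q.2 == v) = false := by
            simp only [beq_eq_false_iff_ne]; exact fun h => hv h.symm
          simp [hv, ih3, hb]

lemma pvKeyGroup (ps : List (String × String)) (v : String) :
    PySem.Set.ofList ((ps.filter (fun p => p.2 == v)).map (·.1)) =
      ((PySem.Set.ofList ps).filter (fun p => p.2 == v)).map (·.1) := by
  induction ps using List.reverseRecOn with
  | nil => simp
  | append_singleton t q ih =>
    rw [List.filter_append, PySem.Set.ofList_append_singleton]
    by_cases hv : q.2 = v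
    · have hb : (q.2 == v) = true := by simp [hv]
      simp only [List.filter_cons, hb, if_true, List.filter_nil, List.map_append,
        List.map_cons, List.map_nil, PySem.Set.ofList_append_singleton, ih]
      by_cases hq : q ∈ PySem.Set.ofList t
      · rw [PySem.Set.add_of_mem hq]
        have hm : q.1 ∈ ((PySem.Set.ofList t).filter (fun p => p.2 == v)).map (·.1) :=
          List.mem_map.mpr ⟨q, List.mem_filter.mpr ⟨hq, hb⟩, rfl⟩
        rw [PySem.Set.add_of_mem hm]
      · rw [PySem.Set.add_of_not_mem hq, List.filter_append]
        have hnot : q.1 ∉ ((PySem.Set.ofList t).filter (fun p => p.2 == v)).map (·.1) := by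
          intro hmem
          obtain ⟨p, hpmem, hp1⟩ := List.mem_map.mp hmem
          obtain ⟨hpt, hpv⟩ := List.mem_filter.mp hpmem
          have h2 : p.2 = v := by simpa using hpv
          have hpq : p = q := Prod.ext hp1 (h2.trans hv.symm)
          exact hq (hpq ▸ hpt)
        rw [PySem.Set.add_of_not_mem hnot]
        simp [hb]
    · have hb : (q.2 == v) = false := by simp [hv]
      simp only [List.filter_cons, hb, Bool.false_eq_true, if_false, List.filter_nil,
        List.append_nil, ih]
      by_cases hq : q ∈ PySem.Set.ofList t
      · rw [PySem.Set.add_of_mem hq]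
      · rw [PySem.Set.add_of_not_mem hq, List.filter_append]
        simp [hb]

lemma pvOuterA (l : List String) (F : String → List String) (a : PySem.Dict String Int)
    (hk : ∀ v ∈ l, ∀ w ∈ F v, w ∈ a.keys) :
    (l.foldl (fun a v => (F v).foldl (fun a w => a.modify w 0 (· + 1)) a) a).keys = a.keys ∧
    ∀ u, (l.foldl (fun a v => (F v).foldl (fun a w => a.modify w 0 (· + 1)) a) a).getD u 0 =
      a.getD u 0 + ((l.map (fun v => ((F v).count u : Int))).sum) := by
  induction l generalizing a with
  | nil => simp
  | cons v t ih =>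
    have hsub : ∀ w ∈ F v, w ∈ a.keys := hk v (by simp)
    have hkeys1 : ((F v).foldl (fun a w => a.modify w 0 (· + 1)) a).keys = a.keys := by
      rw [PySem.Dict.keys_foldl_modify (F v) 0 (fun _ _ => (· + 1)) a,
        pvUpdate_of_subset _ _ hsub]
    have hk' : ∀ v' ∈ t, ∀ w ∈ F v', w ∈ ((F v).foldl (fun a w => a.modify w 0 (· + 1)) a).keys := by
      intro v' hv' w hw
      rw [hkeys1]
      exact hk v' (by simp [hv']) w hw
    obtain ⟨ihk, ihg⟩ := ih ((F v).foldl (fun a w => a.modify w 0 (· + 1)) a) hk'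
    refine ⟨by rw [List.foldl_cons, ihk, hkeys1], ?_⟩
    intro u
    rw [List.foldl_cons, ihg u, PySem.Dict.getD_foldl_modify_add_one]
    simp only [List.map_cons, List.sum_cons]
    ring

lemma pvCountP_or_disjoint {α : Type} (l : List α) (p q : α → Bool)
    (h : ∀ a, ¬(p a = true ∧ q a = true)) :
    l.countP (fun a => p a || q a) = l.countP p + l.countP q := by
  induction l with
  | nil => simp
  | cons x t ih =>
    simp only [List.countP_cons, ih]
    by_cases hp : p x = true
    · have hq : q x = false := by
        rcases hq : q x
        · rfl
        · exact absurd ⟨hp, hq⟩ (h x)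
      simp [hp, hq]; omega
    · simp only [Bool.not_eq_true] at hp
      simp [hp]
      rcases hq : q x
      · simp
      · simp
        omega

lemma pvCountP_partition (dp : List (String × String)) (u : String) (ks : List String)
    (hnd : ks.Nodup) :
    ((ks.map (fun v => dp.countP (fun p => p.1 == u && p.2 == v))).sum) =
      dp.countP (fun p => p.1 == u && decide (p.2 ∈ ks)) := by
  induction ks with
  | nil => simp
  | cons v t ih =>
    have hv : v ∉ t := (List.nodup_cons.mp hnd).1
    have hnd' := (List.nodup_cons.mp hnd).2
    rw [List.map_cons, List.sum_cons, ih hnd']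
    have hcongr : dp.countP (fun p => p.1 == u && decide (p.2 ∈ v :: t)) =
        dp.countP (fun p => (p.1 == u && p.2 == v) || (p.1 == u && decide (p.2 ∈ t))) := by
      apply List.countP_congr
      intro p _
      by_cases h1 : p.1 = u <;> by_cases h2 : p.2 = v <;> by_cases h3 : p.2 ∈ t <;>
        simp [h1, h2, h3]
    rw [hcongr, pvCountP_or_disjoint]
    intro p hpq
    obtain ⟨hp, hq⟩ := hpq
    have h2 : p.2 = v := by
      have := (Bool.and_eq_true _ _).mp hp
      simpa using this.2
    have h3 : p.2 ∈ t := by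
      have := (Bool.and_eq_true _ _).mp hq
      simpa using this.2
    exact hv (h2 ▸ h3)


-- ===== VERDICT (by name: the statement is the Claim_ definition above) =====
theorem solution_spec : Claim_equal_solution := by
  intro id_list report k _hdom hpre
  unfold Spec_solution
  have hpair : ∀ p ∈ report.map pvParse, p.1 ∈ id_list ∧ p.2 ∈ id_list := by
    intro p hp
    obtain ⟨r, hr, hpr⟩ := List.mem_map.mp hp
    obtain ⟨_, h1, h2⟩ := pvSplit_eq hpre hr
    exact hpr ▸ ⟨h1, h2⟩
  -- abbreviations (proof-local)
  have hDnodup : (PySem.Set.ofList id_list).Nodup := PySem.Set.nodup_ofList id_list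
  have ha0keys : (id_list.foldl (fun d i => d.insert i (0 : Int)) PySem.Dict.empty).keys
      = PySem.Set.ofList id_list := pvInitDict_keys id_list 0
  -- ---------- A side ----------
  have hA : solution id_list report k =
      (PySem.Set.ofList id_list).map (fun u =>
        (id_list.foldl (fun d i => d.insert i (0 : Int)) PySem.Dict.empty).getD u 0 +
        ((((PySem.Set.ofList id_list).filter (fun v => decide (k ≤
              ((((PySem.Set.ofList (report.map pvParse)).filter
                  (fun p => p.2 == v)).length : Nat) : Int)))).map
          (fun v => (((PySem.Set.ofList (((report.map pvParse).filter
              (fun p => p.2 == v)).map (·.1))).count u : Nat) : Int))).sum)) := by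
    simp only [solution]
    have h1 : (List.foldl
          (fun d r =>
            match PySem.Str.split₀ r with
            | [user, reported_user] =>
              match d.get? reported_user with
              | some s => d.insert reported_user (s.add user)
              | none => d
            | _ => d)
          (List.foldl (fun d id => d.insert id PySem.Set.empty) PySem.Dict.empty id_list)
          report)
        = List.foldl pvStepA
            (List.foldl (fun d id => d.insert id PySem.Set.empty) PySem.Dict.empty id_list)
            (report.map pvParse) := by
      rw [List.foldl_map]
      apply PySem.List.foldl_congr_mem
      intro acc r hr
      obtain ⟨hsp, _, _⟩ := pvSplit_eq hpre hr
      rw [hsp]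
      rfl
    rw [h1]
    have hr0keys : (List.foldl (fun d id => d.insert id (PySem.Set.empty : PySem.Set String))
        PySem.Dict.empty id_list).keys = PySem.Set.ofList id_list :=
      pvInitDict_keys id_list PySem.Set.empty
    obtain ⟨hRkeys, hRget⟩ := pvStepA_foldl (report.map pvParse)
        (List.foldl (fun d id => d.insert id PySem.Set.empty) PySem.Dict.empty id_list)
        (by
          intro p hp
          rw [PySem.Dict.contains_iff_mem_keys, hr0keys]
          exact (PySem.Set.mem_ofList id_list p.2).mpr (hpair p hp).2)
    have hitems : (List.foldl pvStepA
          (List.foldl (fun d id => d.insert id PySem.Set.empty) PySem.Dict.empty id_list)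
          (report.map pvParse)).items
        = (PySem.Set.ofList id_list).map (fun v =>
            (v, PySem.Set.ofList (((report.map pvParse).filter
                (fun p => p.2 == v)).map (·.1)))) := by
      rw [PySem.Dict.items_eq_map_keys _ (by rw [hRkeys, hr0keys]; exact hDnodup)
        PySem.Set.empty]
      rw [hRkeys, hr0keys]
      apply List.map_congr_left
      intro v hv
      have hvid : v ∈ id_list := (PySem.Set.mem_ofList id_list v).mp hv
      have : (List.foldl (fun d id => d.insert id (PySem.Set.empty : PySem.Set String))
          PySem.Dict.empty id_list).get? v = some PySem.Set.empty := by
        rw [pvInitDict_get?]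
        simp [hvid]
      rw [PySem.Dict.getD_eq_get?_getD, hRget v, this]
      simp [PySem.Set.update_nil_left]
    rw [hitems, List.foldl_map]
    have hclean : (List.foldl
        (fun x v => if k ≤ (PySem.Set.ofList (((report.map pvParse).filter
              (fun p => p.2 == v)).map (·.1))).len then
            List.foldl (fun a user => a.modify user 0 fun x => x + 1) x
              (PySem.Set.ofList (((report.map pvParse).filter
                (fun p => p.2 == v)).map (·.1)))
          else x)
        (List.foldl (fun d id => d.insert id 0) PySem.Dict.empty id_list)
        (PySem.Set.ofList id_list)).values
      = List.map
          (fun u =>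
            (List.foldl (fun d i => d.insert i (0 : Int)) PySem.Dict.empty id_list).getD u 0 +
              (List.map
                  (fun v =>
                    ((List.count u
                        (PySem.Set.ofList
                          (List.map (fun x => x.1)
                            (List.filter (fun p => p.2 == v) (List.map pvParse report)))) : Nat) : Int))
                  (List.filter
                    (fun v =>
                      decide (k ≤ ((((List.filter (fun p => p.2 == v)
                        (PySem.Set.ofList (List.map pvParse report))).length : Nat)) : Int)))
                    (PySem.Set.ofList id_list))).sum)
          (PySem.Set.ofList id_list) := by
      rw [PySem.List.foldl_ite_eq_foldl_filter
        (p := fun v => k ≤ (PySem.Set.ofList (((report.map pvParse).filter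
          (fun p => p.2 == v)).map (·.1))).len)
        (f := fun (x : PySem.Dict String Int) (v : String) =>
          List.foldl (fun a user => a.modify user 0 fun x => x + 1) x
            (PySem.Set.ofList (((report.map pvParse).filter (fun p => p.2 == v)).map (·.1))))]
      have hlen : ∀ v, (PySem.Set.ofList (((report.map pvParse).filter
            (fun p => p.2 == v)).map (·.1))).len
          = ((((PySem.Set.ofList (report.map pvParse)).filter
              (fun p => p.2 == v)).length : Nat) : Int) := by
        intro v
        rw [PySem.Set.len, pvKeyGroup]
        simp
      have hfc : List.filter (fun v => decide (k ≤ (PySem.Set.ofList (((report.map pvParse).filter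
            (fun p => p.2 == v)).map (·.1))).len)) (PySem.Set.ofList id_list)
          = List.filter (fun v => decide (k ≤ ((((PySem.Set.ofList (report.map pvParse)).filter
              (fun p => p.2 == v)).length : Nat) : Int))) (PySem.Set.ofList id_list) := by
        apply List.filter_congr
        intro v _
        rw [hlen v]
      rw [hfc]
      obtain ⟨hOk, hOg⟩ := pvOuterA
        (List.filter (fun v => decide (k ≤ ((((PySem.Set.ofList (report.map pvParse)).filter
            (fun p => p.2 == v)).length : Nat) : Int))) (PySem.Set.ofList id_list))
        (fun v => PySem.Set.ofList (((report.map pvParse).filter (fun p => p.2 == v)).map (·.1)))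
        (List.foldl (fun d id => d.insert id 0) PySem.Dict.empty id_list)
        (by
          intro v _ w hw
          have hw' : w ∈ ((report.map pvParse).filter (fun p => p.2 == v)).map (·.1) :=
            (PySem.Set.mem_ofList _ w).mp hw
          obtain ⟨p, hpmem, hp1⟩ := List.mem_map.mp hw'
          have hp : p ∈ report.map pvParse := List.mem_of_mem_filter hpmem
          rw [ha0keys]
          exact (PySem.Set.mem_ofList id_list w).mpr (hp1 ▸ (hpair p hp).1))
      rw [PySem.Dict.values_eq_map_keys _ (by rw [hOk, ha0keys]; exact hDnodup) 0,
        hOk, ha0keys]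
      apply List.map_congr_left
      intro u _
      rw [hOg u]
    exact hclean
  -- ---------- B side ----------
  have hB : solution_alt id_list report k =
      (PySem.Set.ofList id_list).map (fun u =>
        (id_list.foldl (fun d i => d.insert i (0 : Int)) PySem.Dict.empty).getD u 0 +
        ((((PySem.Set.ofList (report.map pvParse)).filter (fun p => decide (p.2 ∈
            (PySem.Set.ofList id_list).filter (fun v => decide (k ≤
              ((((PySem.Set.ofList (report.map pvParse)).filter
                  (fun p => p.2 == v)).length : Nat) : Int)))))).map (·.1)).count u : Int)) := by
    simp only [solution_alt]
    have h1 : (List.foldl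
          (fun (st : PySem.Dict String Int × PySem.Set (String × String) ×
              List (String × String)) r =>
            match (PySem.Str.split₀ r)[0]?, (PySem.Str.split₀ r)[1]?, (PySem.Str.split₀ r)[2]? with
            | some user, some reported_user, none =>
              if (user, reported_user) ∈ st.2.1 then st
              else (st.1.modify reported_user 0 fun x => x + 1,
                st.2.1.add (user, reported_user), st.2.2 ++ [(user, reported_user)])
            | _, _, _ => st)
          (List.foldl (fun d id => d.insert id 0) PySem.Dict.empty id_list,
            PySem.Set.empty, []) report)
        = List.foldl pvStepB
            (List.foldl (fun d id => d.insert id 0) PySem.Dict.empty id_list,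
              PySem.Set.empty, []) (report.map pvParse) := by
      rw [List.foldl_map]
      apply PySem.List.foldl_congr_mem
      intro acc r hr
      obtain ⟨hsp, _, _⟩ := pvSplit_eq hpre hr
      rw [hsp]
      rfl
    rw [h1]
    obtain ⟨hst1, hCkeys, hCget⟩ := pvStepB_foldl id_list (report.map pvParse)
      (fun p hp => (hpair p hp).2)
    have h22 : (List.foldl pvStepB
          (List.foldl (fun d id => d.insert id 0) PySem.Dict.empty id_list,
            PySem.Set.empty, []) (report.map pvParse)).2.2
        = PySem.Set.ofList (report.map pvParse) := by
      have := congrArg (fun t : PySem.Dict String Int × PySem.Set (String × String) ×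
          List (String × String) => t.2.2) hst1
      simpa using this
    have hitemsB : (List.foldl pvStepB
          (List.foldl (fun d id => d.insert id 0) PySem.Dict.empty id_list,
            PySem.Set.empty, []) (report.map pvParse)).1.items
        = (PySem.Set.ofList id_list).map (fun v =>
            (v, ((((PySem.Set.ofList (report.map pvParse)).filter
                (fun p => p.2 == v)).length : Nat) : Int))) := by
      rw [PySem.Dict.items_eq_map_keys _ (by rw [hCkeys]; exact hDnodup) 0, hCkeys]
      apply List.map_congr_left
      intro v _
      rw [hCget v]
    rw [hitemsB, h22]
    have hbanned : PySem.Set.ofList ((((PySem.Set.ofList id_list).map (fun v =>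
          (v, ((((PySem.Set.ofList (report.map pvParse)).filter
              (fun p => p.2 == v)).length : Nat) : Int)))).filter
            (fun p => decide (k ≤ p.2))).map (·.1))
        = (PySem.Set.ofList id_list).filter (fun v => decide (k ≤
            ((((PySem.Set.ofList (report.map pvParse)).filter
                (fun p => p.2 == v)).length : Nat) : Int))) := by
      rw [List.filter_map, List.map_map]
      rw [show ((fun x : String × Int => x.1) ∘ (fun v : String =>
          (v, ((((PySem.Set.ofList (report.map pvParse)).filter
              (fun p => p.2 == v)).length : Nat) : Int)))) = fun v : String => v from rfl]
      rw [List.map_id']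
      apply PySem.Set.ofList_eq_self_of_nodup
      exact List.Nodup.filter _ hDnodup
    rw [hbanned]
    rw [PySem.List.foldl_ite_eq_foldl_filter
      (p := fun p : String × String => p.2 ∈
        (PySem.Set.ofList id_list).filter (fun v => decide (k ≤
          ((((PySem.Set.ofList (report.map pvParse)).filter
              (fun p => p.2 == v)).length : Nat) : Int))))
      (f := fun (a : PySem.Dict String Int) (p : String × String) =>
        a.modify p.1 0 (· + 1))]
    rw [← List.foldl_map (f := fun p : String × String => p.1)
      (g := fun (a : PySem.Dict String Int) (w : String) => a.modify w 0 (· + 1))]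
    have hkeysB : ((((PySem.Set.ofList (report.map pvParse)).filter (fun p => decide (p.2 ∈
          (PySem.Set.ofList id_list).filter (fun v => decide (k ≤
            ((((PySem.Set.ofList (report.map pvParse)).filter
                (fun p => p.2 == v)).length : Nat) : Int)))))).map (·.1)).foldl
          (fun (a : PySem.Dict String Int) w => a.modify w 0 (· + 1))
          (List.foldl (fun d id => d.insert id 0) PySem.Dict.empty id_list)).keys
        = PySem.Set.ofList id_list := by
      rw [PySem.Dict.keys_foldl_modify _ 0 (fun _ _ => (· + 1)) _, ha0keys]
      apply pvUpdate_of_subset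
      intro w hw
      obtain ⟨p, hpmem, hp1⟩ := List.mem_map.mp hw
      have hp : p ∈ (PySem.Set.ofList (report.map pvParse) :
          List (String × String)) := List.mem_of_mem_filter hpmem
      have hp' : p ∈ report.map pvParse := (PySem.Set.mem_ofList _ p).mp hp
      exact (PySem.Set.mem_ofList id_list w).mpr (hp1 ▸ (hpair p hp').1)
    rw [PySem.Dict.values_eq_map_keys _ (by rw [hkeysB]; exact hDnodup) 0, hkeysB]
    apply List.map_congr_left
    intro u _
    rw [PySem.Dict.getD_foldl_modify_add_one]
  -- ---------- combine ----------
  rw [hA, hB]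
  apply List.map_congr_left
  intro u _
  congr 1
  have hbnodup : ((PySem.Set.ofList id_list).filter (fun v => decide (k ≤
      ((((PySem.Set.ofList (report.map pvParse)).filter
          (fun p => p.2 == v)).length : Nat) : Int)))).Nodup :=
    List.Nodup.filter _ hDnodup
  have hterm : ∀ v : String,
      ((List.count u (PySem.Set.ofList (((report.map pvParse).filter
          (fun p => p.2 == v)).map (·.1))) : Nat) : Int)
        = (((PySem.Set.ofList (report.map pvParse)).countP
            (fun p => p.1 == u && p.2 == v) : Nat) : Int) := by
    intro v
    rw [pvKeyGroup, List.count_eq_countP, List.countP_map, List.countP_filter]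
    rfl
  calc (List.map (fun v => ((List.count u (PySem.Set.ofList (((report.map pvParse).filter
          (fun p => p.2 == v)).map (·.1))) : Nat) : Int))
        ((PySem.Set.ofList id_list).filter (fun v => decide (k ≤
          ((((PySem.Set.ofList (report.map pvParse)).filter
              (fun p => p.2 == v)).length : Nat) : Int))))).sum
      = (List.map (fun v => (((PySem.Set.ofList (report.map pvParse)).countP
            (fun p => p.1 == u && p.2 == v) : Nat) : Int))
          ((PySem.Set.ofList id_list).filter (fun v => decide (k ≤
            ((((PySem.Set.ofList (report.map pvParse)).filter
                (fun p => p.2 == v)).length : Nat) : Int))))).sum := by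
        exact congrArg List.sum (List.map_congr_left (fun v _ => hterm v))
    _ = ((List.map (fun v => (PySem.Set.ofList (report.map pvParse)).countP
            (fun p => p.1 == u && p.2 == v))
          ((PySem.Set.ofList id_list).filter (fun v => decide (k ≤
            ((((PySem.Set.ofList (report.map pvParse)).filter
                (fun p => p.2 == v)).length : Nat) : Int))))).sum : Nat) := by
        rw [Nat.cast_list_sum, List.map_map]
        rfl
    _ = (((PySem.Set.ofList (report.map pvParse)).countP (fun p => p.1 == u &&
          decide (p.2 ∈ (PySem.Set.ofList id_list).filter (fun v => decide (k ≤
            ((((PySem.Set.ofList (report.map pvParse)).filter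
                (fun p => p.2 == v)).length : Nat) : Int)))))) : Int) := by
        rw [pvCountP_partition _ u _ hbnodup]
    _ = ((List.count u (((PySem.Set.ofList (report.map pvParse)).filter (fun p => decide (p.2 ∈ ((PySem.Set.ofList id_list).filter (fun v => decide (k ≤ ((((PySem.Set.ofList (report.map pvParse)).filter (fun p => p.2 == v)).length : Nat) : Int))))))).map (·.1)) : Nat) : Int) := by
        rw [List.count_eq_countP, List.countP_map, List.countP_filter]
        rfl
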